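-- pv_equiv track=rewrite | github.com/CC-Open-Learning/AI-Investigation-Confluence | attachments/1642004481/1642397697.py | indented_list_sort
-- ===== SOURCE A (Python) =====
-- def indented_list_sort(indented_list, indent="    "):
--     KEY, ITEM, CHILDREN = range(3)
--
--     def add_entry(level, key, item, children):
--         children.append((level, key, item, []))
--
--     def update_indented_list(entry):
--         level, key, item, children = entry
--         indented_list.append(indent * level + item)
--         for child in sorted(children):
--             update_indented_list(child)
--
--     entries = []
--     for item in indented_list:
--         level = 0
--         i = 0
--         while item.startswith(indent, i):
--             i += len(indent)
--             level += 1
--         key = item.strip().lower()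
--         add_entry(level, key, item, entries)
--
--     indented_list = []
--     for entry in sorted(entries):
--         update_indented_list(entry)
--     return indented_list
-- ===== SOURCE B (Python) =====
-- def indented_list_sort(indented_list, indent="    "):
--     # Bucket items by indentation level, then emit buckets in ascending level
--     # order, each bucket sorted by (lowercased stripped key, item).
--     buckets = {}
--     for item in indented_list:
--         level = 0
--         i = 0
--         while item.startswith(indent, i):
--             i += len(indent)
--             level += 1
--         buckets.setdefault(level, []).append((item.strip().lower(), item))
--     result = []
--     for level in sorted(buckets):
--         for _key, item in sorted(buckets[level]):
--             result.append(indent * level + item)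
--     return result
-- ===== Notes on version B (the rewrite author's own statement) =====
-- stated objective: alternative
-- what changed: B replaces A's global sort of (level, key, item, children) tuples plus a recursive tree-walk emitter by a bucket/group-by structure: a dict mapping indentation level to its (key, item) pairs, then one sort of the level keys and one sort per bucket, emitting each bucket in ascending level order; correct because the global tuple order is lexicographic with level as the primary component.
import Mathlib
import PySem

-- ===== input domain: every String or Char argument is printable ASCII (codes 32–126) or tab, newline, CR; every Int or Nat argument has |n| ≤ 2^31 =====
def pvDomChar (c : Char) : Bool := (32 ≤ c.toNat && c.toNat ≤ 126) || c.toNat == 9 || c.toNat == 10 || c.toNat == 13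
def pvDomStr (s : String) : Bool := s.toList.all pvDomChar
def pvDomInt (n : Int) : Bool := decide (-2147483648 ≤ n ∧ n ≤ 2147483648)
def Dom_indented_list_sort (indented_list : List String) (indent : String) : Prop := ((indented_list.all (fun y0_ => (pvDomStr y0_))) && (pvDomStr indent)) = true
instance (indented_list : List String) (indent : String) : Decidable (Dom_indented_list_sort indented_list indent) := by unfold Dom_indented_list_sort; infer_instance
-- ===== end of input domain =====

-- B replaces A's global sort of entry tuples plus recursive tree-walk emitter by a group-by-level
-- bucket dict, one sort of the level keys and one (key, item) sort per bucket: an alternative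
-- decomposition of the same task. Neither implementation mutates its argument.

-- shared Python string primitive: indent * level  (s * n; here n is a count ≥ 0)
def pvStrMul (s : List Char) : Nat → List Char
  | 0 => []
  | n + 1 => s ++ pvStrMul s n

-- the level loop both Pythons share verbatim:
-- `level = 0; i = 0; while item.startswith(indent, i): i += len(indent); level += 1`.
-- `item.startswith(indent, i)` with 0 ≤ i is `PySem.Chars.startswith (cs.drop i) ind`.
-- The `ind ≠ []` conjunct only makes the recursion total: with indent = "" the Python loop
-- diverges on any item, so no return value is claimed to be matched there (both ports still
-- agree, treating every level as 0).
def pvLevel (cs ind : List Char) (i level : Nat) : Nat :=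
  if h : ind ≠ [] ∧ PySem.Chars.startswith (cs.drop i) ind then pvLevel cs ind (i + ind.length) (level + 1)
  else level
termination_by cs.length - i
decreasing_by
  have h1 : ind.length ≤ (cs.drop i).length :=
    ((PySem.Chars.startswith_iff _ _).mp h.2).length_le
  have h2 : 0 < ind.length := List.length_pos_iff.mpr h.1
  simp only [List.length_drop] at h1
  omega

-- ===== PORT A =====

-- an entry (level, key, item, children); children is always the empty list (nothing is ever
-- appended to a child list), so its element type is uninhabited
abbrev pvEntryA : Type := Int × List Char × List Char × List Empty

-- Python's tuple `<` on two entries: since the fourth (children) components are always equal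
-- (both []), `sorted(entries)` orders by the lexicographic order of the first three components,
-- i.e. by this key into the lexicographic product
def pvKeyA (e : pvEntryA) : Lex (Int × Lex (List Char × List Char)) :=
  toLex (e.1, toLex (e.2.1, e.2.2.1))

-- update_indented_list: append indent*level + item, then recurse over sorted(children);
-- children : List Empty, so the recursive call's body is uninhabited-eliminated (Python never runs it)
def pvUpdateA (indent : String) (acc : List String) (e : pvEntryA) : List String :=
  let acc' := acc ++ [String.ofList (pvStrMul indent.toList e.1.toNat ++ e.2.2.1)]
  let sortedCh := PySem.List.sorted e.2.2.2 (fun c : Empty => (c.elim : Int)) false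
  sortedCh.foldl (fun _a (c : Empty) => c.elim) acc'

def indented_list_sort (indented_list : List String) (indent : String) : List String :=
  -- entries = []; for item in indented_list: … add_entry(level, key, item, entries)
  let entries : List pvEntryA := indented_list.foldl (fun acc item =>
    let cs := item.toList
    let level := pvLevel cs indent.toList 0 0
    let key := PySem.Chars.lower (PySem.Chars.strip cs)
    acc ++ [((level : Int), key, cs, ([] : List Empty))]) []
  -- indented_list = []; for entry in sorted(entries): update_indented_list(entry)
  (PySem.List.sorted entries pvKeyA false).foldl (fun acc e => pvUpdateA indent acc e) []

-- ===== PORT B =====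

def indented_list_sort_alt (indented_list : List String) (indent : String) : List String :=
  -- buckets = {}; for item: … buckets.setdefault(level, []).append((item.strip().lower(), item))
  let buckets : PySem.Dict Int (List (List Char × List Char)) :=
    indented_list.foldl (fun d item =>
      let cs := item.toList
      let level := pvLevel cs indent.toList 0 0
      d.modify ((level : Int)) [] (fun b => b ++ [(PySem.Chars.lower (PySem.Chars.strip cs), cs)]))
      PySem.Dict.empty
  -- for level in sorted(buckets): for _key, item in sorted(buckets[level]): result.append(…)
  (PySem.List.sorted buckets.keys (fun k => k) false).foldl (fun res lv =>
    (PySem.List.sorted (buckets.getD lv []) (fun p => toLex p) false).foldl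
      (fun res p => res ++ [String.ofList (pvStrMul indent.toList lv.toNat ++ p.2)]) res) []

-- ===== PRECONDITION & SPEC =====
def Spec_indented_list_sort (indented_list : List String) (indent : String) (out : List String) : Prop := out = indented_list_sort_alt indented_list indent
instance (indented_list : List String) (indent : String) (out : List String) : Decidable (Spec_indented_list_sort indented_list indent out) := by unfold Spec_indented_list_sort; infer_instance

-- ===== CLAIM (what is proved, stated in full; the proofs are below) =====
def Claim_equal_indented_list_sort : Prop := ∀ (indented_list : List String) (indent : String), Dom_indented_list_sort indented_list indent → Spec_indented_list_sort indented_list indent (indented_list_sort indented_list indent)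

-- ===== LEMMAS AND PROOFS =====

-- the triple (level, key, item) both programs are really ordering
abbrev pvT3 : Type := Int × List Char × List Char

def pvKeyT (e : pvT3) : Lex (Int × Lex (List Char × List Char)) :=
  toLex (e.1, toLex (e.2.1, e.2.2))

def pvG (ind : List Char) (item : String) : pvT3 :=
  ((pvLevel item.toList ind 0 0 : Int),
    PySem.Chars.lower (PySem.Chars.strip item.toList), item.toList)

def pvRender (ind : List Char) (e : pvT3) : String :=
  String.ofList (pvStrMul ind e.1.toNat ++ e.2.2)

def pvAttach (t : pvT3) : pvEntryA := (t.1, t.2.1, t.2.2, ([] : List Empty))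

theorem pvKeyT_injective : Function.Injective pvKeyT := by
  intro a b h
  obtain ⟨a1, a2, a3⟩ := a
  obtain ⟨b1, b2, b3⟩ := b
  simpa [pvKeyT, Prod.ext_iff] using h

-- ---- A's result as a map over one globally sorted triple list ----

theorem insertBy_attach (t : pvT3) (acc : List pvT3) :
    PySem.List.insertBy (fun a b => decide (pvKeyA a < pvKeyA b)) (pvAttach t) (acc.map pvAttach)
      = (PySem.List.insertBy (fun a b => decide (pvKeyT a < pvKeyT b)) t acc).map pvAttach := by
  induction acc with
  | nil => rfl
  | cons y ys ih =>
    simp only [List.map_cons, PySem.List.insertBy]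
    have hc : decide (pvKeyA (pvAttach t) < pvKeyA (pvAttach y)) = decide (pvKeyT t < pvKeyT y) := rfl
    by_cases h : pvKeyT t < pvKeyT y
    · simp only [hc, decide_eq_true h, if_true]
      rfl
    · simp only [hc, decide_eq_false (not_lt.mpr (le_of_not_gt h)), Bool.false_eq_true, if_false]
      rw [List.map_cons, ih]

theorem sorted_attach (ts : List pvT3) :
    PySem.List.sorted (ts.map pvAttach) pvKeyA false
      = (PySem.List.sorted ts pvKeyT false).map pvAttach := by
  rw [PySem.List.sorted_eq_foldl_insertBy, PySem.List.sorted_eq_foldl_insertBy]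
  suffices h : ∀ acc : List pvT3,
      (ts.map pvAttach).foldl (fun acc x => PySem.List.insertBy (fun a b => decide (pvKeyA a < pvKeyA b)) x acc) (acc.map pvAttach)
        = (ts.foldl (fun acc x => PySem.List.insertBy (fun a b => decide (pvKeyT a < pvKeyT b)) x acc) acc).map pvAttach by
    simpa using h []
  induction ts with
  | nil => intro acc; rfl
  | cons t ts ih =>
    intro acc
    simp only [List.map_cons, List.foldl_cons, insertBy_attach]
    exact ih _

theorem A_as_map (xs : List String) (ind : String) :
    indented_list_sort xs ind
      = (PySem.List.sorted (xs.map (pvG ind.toList)) pvKeyT false).map (pvRender ind.toList) := by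
  unfold indented_list_sort
  dsimp only
  rw [PySem.List.foldl_append_singleton_eq_map]
  have hmap : (xs.map fun item =>
      (((pvLevel item.toList ind.toList 0 0 : Nat) : Int),
        PySem.Chars.lower (PySem.Chars.strip item.toList), item.toList, ([] : List Empty)))
      = (xs.map (pvG ind.toList)).map pvAttach := by
    simp [List.map_map, pvAttach, pvG, Function.comp_def]
  simp only [List.nil_append]
  rw [hmap, sorted_attach, List.foldl_map]
  have hupd : ∀ (acc : List String) (t : pvT3),
      pvUpdateA ind acc (pvAttach t) = acc ++ [pvRender ind.toList t] := fun _ _ => rfl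
  simp only [hupd]
  rw [PySem.List.foldl_append_singleton_eq_map]
  simp

-- ---- B's result as a map over a flatMap of sorted buckets ----

def pvTag (lv : Int) (p : List Char × List Char) : pvT3 := (lv, p.1, p.2)

def pvPairs (ind : List Char) (xs : List String) : List (Int × (List Char × List Char)) :=
  xs.map (fun item =>
    ((pvLevel item.toList ind 0 0 : Int),
      (PySem.Chars.lower (PySem.Chars.strip item.toList), item.toList)))

def pvBucketOf (ind : List Char) (xs : List String) (lv : Int) : List (List Char × List Char) :=
  ((pvPairs ind xs).filter (fun p => p.1 == lv)).map (·.2)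

def pvLevels (ind : List Char) (xs : List String) : List Int :=
  PySem.List.sorted (PySem.Set.ofList ((pvPairs ind xs).map (·.1))) (fun k => k) false

def pvLB (ind : List Char) (xs : List String) : List pvT3 :=
  (pvLevels ind xs).flatMap (fun lv =>
    (PySem.List.sorted (pvBucketOf ind xs lv) (fun p => toLex p) false).map (pvTag lv))

theorem B_as_map (xs : List String) (ind : String) :
    indented_list_sort_alt xs ind = (pvLB ind.toList xs).map (pvRender ind.toList) := by
  unfold indented_list_sort_alt
  dsimp only
  have hfold : (xs.foldl (fun d item =>
      d.modify ((pvLevel item.toList ind.toList 0 0 : Nat) : Int) []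
        (fun b => b ++ [(PySem.Chars.lower (PySem.Chars.strip item.toList), item.toList)]))
      PySem.Dict.empty)
      = (pvPairs ind.toList xs).foldl (fun d p => d.modify p.1 [] (fun b => b ++ [p.2])) PySem.Dict.empty := by
    rw [pvPairs, List.foldl_map]
  rw [hfold]
  have hkeys : ((pvPairs ind.toList xs).foldl (fun d p => d.modify p.1 [] (fun b => b ++ [p.2])) PySem.Dict.empty).keys
      = PySem.Set.ofList ((pvPairs ind.toList xs).map (·.1)) := by
    have h := PySem.Dict.keys_foldl_modify_key (pvPairs ind.toList xs) (·.1) ([] : List (List Char × List Char))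
      (fun _ p => fun b => b ++ [p.2]) PySem.Dict.empty
    rw [h, PySem.Dict.keys_empty, PySem.Set.update, ← PySem.Set.ofList_eq_foldl]
  have hgetD : ∀ lv, ((pvPairs ind.toList xs).foldl (fun d p => d.modify p.1 [] (fun b => b ++ [p.2])) PySem.Dict.empty).getD lv []
      = pvBucketOf ind.toList xs lv := by
    intro lv
    have h := PySem.Dict.getD_foldl_modify_append (pvPairs ind.toList xs) PySem.Dict.empty lv
    rw [h, PySem.Dict.getD_empty]
    rfl
  rw [hkeys]
  simp only [hgetD]
  have hinner : ∀ (res : List String) (lv : Int),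
      (PySem.List.sorted (pvBucketOf ind.toList xs lv) (fun p => toLex p) false).foldl
        (fun res p => res ++ [String.ofList (pvStrMul ind.toList lv.toNat ++ p.2)]) res
      = res ++ ((PySem.List.sorted (pvBucketOf ind.toList xs lv) (fun p => toLex p) false).map (pvTag lv)).map (pvRender ind.toList) := by
    intro res lv
    rw [PySem.List.foldl_append_singleton_eq_map]
    simp [List.map_map, pvTag, pvRender, Function.comp_def]
  simp only [hinner]
  rw [PySem.List.foldl_append_eq_flatMap]
  simp [pvLB, pvLevels, List.map_flatMap]

-- ---- the two triple lists are equal: same multiset, both sorted under the same linear key ----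

theorem perm_flatMap_filter {β : Type} (ks : List Int) (l : List (Int × β))
    (hnd : ks.Nodup) (hmem : ∀ p ∈ l, p.1 ∈ ks) :
    (ks.flatMap (fun k => l.filter (fun p => p.1 == k))).Perm l := by
  induction ks generalizing l with
  | nil =>
    cases l with
    | nil => simp
    | cons p l => exact absurd (hmem p (by simp)) (by simp)
  | cons k ks ih =>
    simp only [List.flatMap_cons]
    have hcongr : ks.flatMap (fun k' => l.filter (fun p => p.1 == k'))
        = ks.flatMap (fun k' => (l.filter (fun p => !(p.1 == k))).filter (fun p => p.1 == k')) := by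
      refine List.flatMap_congr (fun k' hk' => ?_)
      rw [List.filter_filter]
      refine (List.filter_congr (fun p _ => ?_)).symm
      have hne : k' ≠ k := by rintro rfl; exact (List.nodup_cons.mp hnd).1 hk'
      by_cases h : p.1 = k'
      · simp [h, hne]
      · simp [h]
    rw [hcongr]
    have hperm := ih (l.filter (fun p => !(p.1 == k)))
      (List.nodup_cons.mp hnd).2
      (by
        intro p hp
        have hp' := List.mem_filter.mp hp
        have := hmem p hp'.1
        simp only [List.mem_cons] at this
        rcases this with h | h
        · rw [h] at hp'
          simp at hp'
        · exact h)
    exact (hperm.append_left _).trans (List.filter_append_perm _ l)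

theorem pvLB_perm (ind : List Char) (xs : List String) :
    (pvLB ind xs).Perm (xs.map (pvG ind)) := by
  have hnd : (pvLevels ind xs).Nodup := by
    unfold pvLevels
    exact (PySem.List.sorted_perm _ _ _).symm.nodup (PySem.Set.nodup_ofList _)
  -- each sorted bucket block is a permutation of the unsorted bucket block
  have h1 : (pvLB ind xs).Perm ((pvLevels ind xs).flatMap (fun lv => (pvBucketOf ind xs lv).map (pvTag lv))) :=
    List.Perm.flatMap (List.Perm.refl _) (fun lv _ => (PySem.List.sorted_perm _ _ _).map _)
  -- the unsorted blocks over the distinct levels are a permutation of all pairs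
  have hblock : ∀ lv, (pvBucketOf ind xs lv).map (pvTag lv)
      = ((pvPairs ind xs).filter (fun p => p.1 == lv)).map (fun p => (p.1, p.2.1, p.2.2)) := by
    intro lv
    rw [pvBucketOf, List.map_map]
    refine List.map_congr_left (fun p hp => ?_)
    have : p.1 = lv := by simpa using (List.mem_filter.mp hp).2
    simp [pvTag, this]
  have h2 : ((pvLevels ind xs).flatMap (fun lv => (pvBucketOf ind xs lv).map (pvTag lv)))
      = ((pvLevels ind xs).flatMap (fun lv => (pvPairs ind xs).filter (fun p => p.1 == lv))).map (fun p => (p.1, p.2.1, p.2.2)) := by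
    rw [List.map_flatMap]
    exact List.flatMap_congr (fun lv _ => hblock lv)
  have h3 : ((pvLevels ind xs).flatMap (fun lv => (pvPairs ind xs).filter (fun p => p.1 == lv))).Perm (pvPairs ind xs) := by
    refine perm_flatMap_filter _ _ hnd (fun p hp => ?_)
    have h1 : p.1 ∈ (pvPairs ind xs).map (fun q => q.1) := List.mem_map_of_mem hp
    have h2 : p.1 ∈ PySem.Set.ofList ((pvPairs ind xs).map (fun q => q.1)) := (PySem.Set.mem_ofList _ _).mpr h1
    unfold pvLevels
    exact (PySem.List.mem_sorted _ _ _ _).mpr h2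
  have h4 : (pvPairs ind xs).map (fun p => (p.1, p.2.1, p.2.2)) = xs.map (pvG ind) := by
    simp [pvPairs, List.map_map, Function.comp_def, pvG]
  have h5 : ((pvLevels ind xs).flatMap (fun lv => (pvBucketOf ind xs lv).map (pvTag lv))).Perm (xs.map (pvG ind)) := by
    rw [h2, ← h4]
    exact h3.map _
  exact h1.trans h5

theorem pvLB_pairwise (ind : List Char) (xs : List String) :
    (pvLB ind xs).Pairwise (fun a b => pvKeyT a ≤ pvKeyT b) := by
  rw [pvLB, List.pairwise_flatMap]
  constructor
  · intro lv _
    rw [List.pairwise_map]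
    refine (PySem.List.sorted_pairwise (pvBucketOf ind xs lv) (fun p => toLex p)).imp ?_
    intro a b hab
    simp only [pvKeyT, pvTag]
    rw [Prod.Lex.le_iff]
    simp only [ofLex_toLex]
    exact Or.inr ⟨by simp, by simpa using hab⟩
  · have hle : (pvLevels ind xs).Pairwise (· ≤ ·) :=
      PySem.List.sorted_pairwise _ (fun k => k)
    have hnd : (pvLevels ind xs).Nodup := by
      unfold pvLevels
      exact (PySem.List.sorted_perm _ _ _).symm.nodup (PySem.Set.nodup_ofList _)
    have hlt : (pvLevels ind xs).Pairwise (· < ·) :=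
      (hle.and hnd).imp (fun h => lt_of_le_of_ne h.1 h.2)
    refine hlt.imp ?_
    intro l1 l2 hlt12 x hx y hy
    obtain ⟨px, _, rfl⟩ := List.mem_map.mp hx
    obtain ⟨py, _, rfl⟩ := List.mem_map.mp hy
    simp only [pvKeyT, pvTag]
    rw [Prod.Lex.le_iff]
    simp only [ofLex_toLex]
    exact Or.inl hlt12

theorem sorted_eq_pvLB (ind : List Char) (xs : List String) :
    PySem.List.sorted (xs.map (pvG ind)) pvKeyT false = pvLB ind xs := by
  refine PySem.List.eq_of_perm_of_pairwise_le_of_injective pvKeyT pvKeyT_injective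
    ((PySem.List.sorted_perm _ _ _).trans (pvLB_perm ind xs).symm)
    (PySem.List.sorted_pairwise _ _) (pvLB_pairwise ind xs)

-- ===== VERDICT (by name: the statement is the Claim_ definition above) =====
theorem indented_list_sort_spec : Claim_equal_indented_list_sort := by
  intro xs ind _hdom
  unfold Spec_indented_list_sort
  rw [A_as_map, B_as_map, sorted_eq_pvLB]
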